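-- pv_equiv track=rewrite | github.com/kfuku52/amalgkit | amalgkit/util.py | find_species_prefixed_entries
-- ===== SOURCE A (Python) =====
-- from bisect import bisect_left
--
-- def find_prefixed_entries(entries, prefix, entries_sorted=False):
--     if entries_sorted:
--         left = bisect_left(entries, prefix)
--         right = bisect_left(entries, prefix + '\uffff')
--         matched = []
--         for i in range(left, right):
--             entry = entries[i]
--             if entry.startswith(prefix):
--                 matched.append(entry)
--         return matched
--     return sorted([
--         entry for entry in entries
--         if entry.startswith(prefix)
--     ])
--
-- def find_species_prefixed_entries(entries, species_prefix, entries_sorted=False):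
--     # Match exact species prefix and only delimiter-based variants (e.g., ".idx", "_k31.idx", "-v1.fa").
--     matched = find_prefixed_entries(entries, species_prefix, entries_sorted=entries_sorted)
--     allowed = []
--     for entry in matched:
--         if entry == species_prefix:
--             allowed.append(entry)
--             continue
--         if entry.startswith(species_prefix + '.'):
--             allowed.append(entry)
--             continue
--         if entry.startswith(species_prefix + '_'):
--             allowed.append(entry)
--             continue
--         if entry.startswith(species_prefix + '-'):
--             allowed.append(entry)
--             continue
--     return allowed
-- ===== SOURCE B (Python) =====
-- def find_species_prefixed_entries(entries, species_prefix, entries_sorted=False):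
--     # One linear pass, no binary search and no helper: on a sorted list every
--     # delimiter-variant match lies inside A's bisect window anyway, so scanning
--     # all entries yields the same list in the same order.
--     n = len(species_prefix)
--     matched = []
--     for entry in entries:
--         if entry[:n] == species_prefix and entry[n:n+1] in ('', '.', '_', '-'):
--             matched.append(entry)
--     return matched if entries_sorted else sorted(matched)
-- ===== Notes on version B (the rewrite author's own statement) =====
-- stated objective: simpler
-- what changed: B drops A's binary searches and its two-stage helper pipeline entirely: one linear pass collects entries passing a slice-equality prefix test plus a one-character delimiter slice, returned as-is when entries_sorted and sorted otherwise.
-- outside the precondition, e.g. on find_species_prefixed_entries(['a.x', 'zz', 'a.y'], 'a', True): A returns ['a.x'], B returns ['a.x', 'a.y']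
import Mathlib
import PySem

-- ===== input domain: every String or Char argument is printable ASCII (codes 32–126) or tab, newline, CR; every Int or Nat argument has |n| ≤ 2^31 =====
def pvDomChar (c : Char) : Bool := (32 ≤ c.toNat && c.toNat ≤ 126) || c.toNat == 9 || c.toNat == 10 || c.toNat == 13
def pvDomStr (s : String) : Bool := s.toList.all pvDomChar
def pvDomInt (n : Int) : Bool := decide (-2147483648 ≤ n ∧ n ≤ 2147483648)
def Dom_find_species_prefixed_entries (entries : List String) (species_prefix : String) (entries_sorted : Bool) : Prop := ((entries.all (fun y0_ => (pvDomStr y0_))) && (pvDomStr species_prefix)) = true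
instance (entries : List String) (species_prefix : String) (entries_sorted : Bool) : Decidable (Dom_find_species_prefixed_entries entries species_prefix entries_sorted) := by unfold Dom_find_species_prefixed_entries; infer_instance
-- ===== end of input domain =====

-- B replaces A's binary searches and its two-stage helper pipeline by one linear pass that tests
-- each entry with slice comparisons (objective: simpler); same return values, no side effects.

-- ===== PORT A =====
-- helper find_prefixed_entries: bisect range scan when sorted, else sorted prefix filter
def find_prefixed_entries (entries : List String) (pfx : String) (entries_sorted : Bool) : List String :=
  if entries_sorted then
    let left := PySem.List.bisectLeft entries pfx
    let right := PySem.List.bisectLeft entries (pfx ++ "\uFFFF")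
    -- for i in range(left, right): entry = entries[i]; if entry.startswith(prefix): matched.append(entry)
    (PySem.List.pyRange (left : Int) (right : Int) 1).foldl
      (fun matched i =>
        let entry := PySem.List.pyGetD entries i ""
        if PySem.Str.startswith entry pfx then matched ++ [entry] else matched) []
  else
    PySem.List.sorted (entries.filter (fun e => PySem.Str.startswith e pfx)) (fun x => x)

def find_species_prefixed_entries (entries : List String) (species_prefix : String) (entries_sorted : Bool) : List String :=
  let matched := find_prefixed_entries entries species_prefix entries_sorted
  matched.foldl
    (fun allowed entry =>
      if entry == species_prefix then allowed ++ [entry]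
      else if PySem.Str.startswith entry (species_prefix ++ ".") then allowed ++ [entry]
      else if PySem.Str.startswith entry (species_prefix ++ "_") then allowed ++ [entry]
      else if PySem.Str.startswith entry (species_prefix ++ "-") then allowed ++ [entry]
      else allowed) []

-- ===== PORT B =====
-- B's loop condition: entry[:n] == species_prefix and entry[n:n+1] in ('', '.', '_', '-'),
-- with n = len(species_prefix) ≥ 0, so both slices have nonnegative in-range bounds and are
-- exactly take/drop on the code points (entry[:n] = take n, entry[n:n+1] = (drop n).take 1).
def bPred (sp : List Char) (entry : String) : Bool :=
  (entry.toList.take sp.length == sp) &&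
    (let d := (entry.toList.drop sp.length).take 1
     d == ([] : List Char) || d == ['.'] || d == ['_'] || d == ['-'])

def find_species_prefixed_entries_alt (entries : List String) (species_prefix : String) (entries_sorted : Bool) : List String :=
  -- n = len(species_prefix); one pass appending entries that pass the slice test
  let matched := entries.foldl
    (fun m entry => if bPred species_prefix.toList entry then m ++ [entry] else m) []
  -- return matched if entries_sorted else sorted(matched)
  if entries_sorted then matched else PySem.List.sorted matched (fun x => x)

-- ===== PRECONDITION & SPEC =====
-- Pre_ excludes calls with entries_sorted=True on a list that is not actually sorted: there
-- bisect_left's documented precondition is violated and A's returned window is an accident of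
-- binary search over unordered data, a value no one would specify.
def Pre_find_species_prefixed_entries (entries : List String) (species_prefix : String) (entries_sorted : Bool) : Prop :=
  entries_sorted = true → List.Pairwise (· ≤ ·) entries
instance (entries : List String) (species_prefix : String) (entries_sorted : Bool) : Decidable (Pre_find_species_prefixed_entries entries species_prefix entries_sorted) := by unfold Pre_find_species_prefixed_entries; infer_instance

def pvWitness_find_species_prefixed_entries : List String × String × Bool :=
  (["Aa.x", "Aa_k31", "Aab", "Zz"], "Aa", false)

def Spec_find_species_prefixed_entries (entries : List String) (species_prefix : String) (entries_sorted : Bool) (out : List String) : Prop := out = find_species_prefixed_entries_alt entries species_prefix entries_sorted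
instance (entries : List String) (species_prefix : String) (entries_sorted : Bool) (out : List String) : Decidable (Spec_find_species_prefixed_entries entries species_prefix entries_sorted out) := by unfold Spec_find_species_prefixed_entries; infer_instance

-- ===== CLAIM (what is proved, stated in full; the proofs are below) =====
def Claim_equal_find_species_prefixed_entries : Prop := ∀ (entries : List String) (species_prefix : String) (entries_sorted : Bool), Dom_find_species_prefixed_entries entries species_prefix entries_sorted → Pre_find_species_prefixed_entries entries species_prefix entries_sorted → Spec_find_species_prefixed_entries entries species_prefix entries_sorted (find_species_prefixed_entries entries species_prefix entries_sorted)

-- ===== LEMMAS AND PROOFS =====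

-- A's delimiter-variant test, as a single boolean predicate
def qA (sp e : String) : Bool :=
  (e == sp) || PySem.Str.startswith e (sp ++ ".") || PySem.Str.startswith e (sp ++ "_") ||
    PySem.Str.startswith e (sp ++ "-")

theorem stage2_eq_filter (sp : String) (l : List String) :
    l.foldl
      (fun allowed entry =>
        if entry == sp then allowed ++ [entry]
        else if PySem.Str.startswith entry (sp ++ ".") then allowed ++ [entry]
        else if PySem.Str.startswith entry (sp ++ "_") then allowed ++ [entry]
        else if PySem.Str.startswith entry (sp ++ "-") then allowed ++ [entry]
        else allowed) [] = l.filter (qA sp) := by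
  have h : (fun (allowed : List String) entry =>
        if entry == sp then allowed ++ [entry]
        else if PySem.Str.startswith entry (sp ++ ".") then allowed ++ [entry]
        else if PySem.Str.startswith entry (sp ++ "_") then allowed ++ [entry]
        else if PySem.Str.startswith entry (sp ++ "-") then allowed ++ [entry]
        else allowed)
      = (fun allowed entry => if qA sp entry then allowed ++ [(fun x => x) entry] else allowed) := by
    funext allowed entry
    cases h1 : entry == sp <;> cases h2 : PySem.Str.startswith entry (sp ++ ".") <;>
      cases h3 : PySem.Str.startswith entry (sp ++ "_") <;>
      cases h4 : PySem.Str.startswith entry (sp ++ "-") <;> simp_all [qA]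
  rw [h, PySem.List.foldl_append_if, List.map_id_fun']
  simp

-- B's foldl loop is the filter by bPred
theorem bfold_eq_filter (sp : List Char) (l : List String) :
    l.foldl (fun m entry => if bPred sp entry then m ++ [entry] else m) []
      = l.filter (bPred sp) := by
  rw [PySem.List.foldl_append_if (bPred sp) (fun x => x), List.map_id_fun']
  simp

-- a string starts with sp ++ c  iff  it starts with sp and the next code point is c
theorem startswith_append_char (e sp : String) (c : Char) :
    PySem.Str.startswith e (sp ++ String.singleton c)
      = (PySem.Str.startswith e sp &&
          match e.toList.drop sp.toList.length with
          | [] => false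
          | c' :: _ => c' == c) := by
  by_cases h : sp.toList <+: e.toList
  · obtain ⟨r, hr⟩ := h
    have he : e.toList = sp.toList ++ r := hr.symm
    simp only [PySem.Str.startswith_eq]
    rw [show (sp ++ String.singleton c).toList = sp.toList ++ [c] by simp [String.singleton]]
    cases hb : PySem.Chars.startswith e.toList (sp.toList ++ [c]) with
    | true =>
      have := (PySem.Chars.startswith_iff _ _).mp hb
      rw [he] at this
      have hc : [c] <+: r := (List.prefix_append_right_inj sp.toList).mp this
      obtain ⟨t, ht⟩ := hc
      have hsp : PySem.Chars.startswith e.toList sp.toList = true :=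
        (PySem.Chars.startswith_iff _ _).mpr ⟨r, he.symm⟩
      rw [hsp, he, List.drop_left, ← ht]
      simp
    | false =>
      have hnc : ¬ (sp.toList ++ [c]) <+: e.toList := by
        intro hp
        have := (PySem.Chars.startswith_iff e.toList (sp.toList ++ [c])).mpr hp
        simp [this] at hb
      rw [he] at hnc
      have : ¬ [c] <+: r := fun hp => hnc ((List.prefix_append_right_inj sp.toList).mpr hp)
      rw [he, List.drop_left]
      cases r with
      | nil => simp
      | cons c' t =>
        have : ¬ (c = c') := by
          intro hc; exact this (by rw [hc]; exact ⟨t, rfl⟩)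
        simp [Ne.symm this]
  · have h1 : PySem.Chars.startswith e.toList sp.toList = false := by
      cases hb : PySem.Chars.startswith e.toList sp.toList with
      | true => exact absurd ((PySem.Chars.startswith_iff _ _).mp hb) h
      | false => rfl
    have h2 : PySem.Chars.startswith e.toList (sp.toList ++ [c]) = false := by
      cases hb : PySem.Chars.startswith e.toList (sp.toList ++ [c]) with
      | true =>
        exact absurd ((sp.toList.prefix_append [c]).trans ((PySem.Chars.startswith_iff _ _).mp hb)) h
      | false => rfl
    simp only [PySem.Str.startswith_eq,
      show (sp ++ String.singleton c).toList = sp.toList ++ [c] by simp [String.singleton]]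
    simp [h1, h2]

-- pointwise agreement of B's slice predicate with A's two stages
theorem pred_eq (sp e : String) :
    bPred sp.toList e = (qA sp e && PySem.Str.startswith e sp) := by
  unfold bPred qA
  by_cases h : sp.toList <+: e.toList
  · have htake : e.toList.take sp.toList.length = sp.toList := (List.prefix_iff_eq_take.mp h).symm
    have hsw : PySem.Str.startswith e sp = true := by
      rw [PySem.Str.startswith_eq]; exact (PySem.Chars.startswith_iff _ _).mpr h
    obtain ⟨r, hr⟩ := h
    have he : e.toList = sp.toList ++ r := hr.symm
    have heq : (e == sp) = (decide (r = [])) := by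
      cases hb : e == sp with
      | true =>
        have : e = sp := by exact eq_of_beq hb
        subst this
        have : r = [] := by
          have := he
          nth_rewrite 1 [show e.toList = e.toList ++ [] by simp] at this
          exact (List.append_cancel_left this).symm
        simp [this]
      | false =>
        have hne : e ≠ sp := fun hee => by simp [hee] at hb
        cases r with
        | nil =>
          exfalso
          apply hne
          have : e.toList = sp.toList := by simpa using he
          exact String.toList_injective this
        | cons c t => simp
    rw [show ("." : String) = String.singleton '.' from rfl,
        show ("_" : String) = String.singleton '_' from rfl,
        show ("-" : String) = String.singleton '-' from rfl,
        startswith_append_char, startswith_append_char, startswith_append_char, heq, hsw, htake]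
    rw [he, List.drop_left]
    cases r with
    | nil => simp
    | cons c t => simp [Bool.or_comm]
  · have hsw : PySem.Str.startswith e sp = false := by
      rw [PySem.Str.startswith_eq]
      cases hb : PySem.Chars.startswith e.toList sp.toList with
      | true => exact absurd ((PySem.Chars.startswith_iff _ _).mp hb) h
      | false => rfl
    have htake : (e.toList.take sp.toList.length == sp.toList) = false := by
      cases hb : e.toList.take sp.toList.length == sp.toList with
      | true =>
        exact absurd (List.prefix_iff_eq_take.mpr (eq_of_beq hb).symm) h
      | false => rfl
    have htake' : (e.toList.take sp.length == sp.toList) = false := by simpa using htake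
    rw [PySem.Str.startswith_eq] at hsw
    have hcs : PySem.Chars.startswith e.toList sp.toList = false := by simpa using hsw
    simp [htake', hcs]

-- bisect_left never returns an index past the right bound (sorted or not)
theorem bisectLoop_le {α : Type} [LT α] [DecidableLT α] (xs : List α) (x : α) :
    ∀ (fuel lo hi : Nat), lo ≤ hi → PySem.List.bisectLeftLoop xs x fuel lo hi ≤ hi := by
  intro fuel
  induction fuel with
  | zero => intro lo hi h; simpa [PySem.List.bisectLeftLoop] using h
  | succ n ih =>
    intro lo hi h
    rw [PySem.List.bisectLeftLoop]
    by_cases hlt : lo < hi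
    · simp only [hlt, if_true]
      cases xs[(lo + hi) / 2]? with
      | none => exact h
      | some y =>
        by_cases hy : y < x
        · simp only [hy, if_true]
          exact ih _ _ (by omega)
        · simp only [hy, if_false]
          exact (ih _ _ (by omega)).trans (by omega)
    · simpa [hlt] using h

theorem bisectLeft_le_len {α : Type} [LT α] [DecidableLT α] (xs : List α) (x : α) :
    PySem.List.bisectLeft xs x ≤ xs.length :=
  bisectLoop_le xs x xs.length 0 xs.length (Nat.zero_le _)

-- reading entries[i] for i in range(a, b) is the slice entries[a:b], when b ≤ len(entries)
theorem map_pyGetD_range (xs : List String) (d : String) :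
    ∀ (b a : Nat), b ≤ xs.length →
      (PySem.List.pyRange (a : Int) (b : Int) 1).map (fun i => PySem.List.pyGetD xs i d)
        = (xs.drop a).take (b - a) := by
  intro b
  induction b with
  | zero =>
    intro a _
    rw [PySem.List.pyRange_one_eq_nil (by omega)]
    simp
  | succ n ih =>
    intro a hb
    by_cases hab : a < n + 1
    · push_cast
      rw [PySem.List.pyRange_one_succ_right (by exact_mod_cast (by omega : a ≤ n))]
      rw [List.map_append, ih a (by omega)]
      have hn : n < xs.length := by omega
      have h1 : (PySem.List.pyGetD xs (n : Int) d) = xs[n] := by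
        rw [PySem.List.pyGetD_natCast]
        exact List.getD_eq_getElem xs d hn
      simp only [List.map_cons, List.map_nil, h1]
      by_cases han : a ≤ n
      · rw [show n + 1 - a = (n - a) + 1 by omega,
            List.take_add_one, List.getElem?_drop]
        rw [show a + (n - a) = n by omega]
        simp [hn]
      · omega
    · rw [PySem.List.pyRange_one_eq_nil (by push_cast; omega)]
      rw [show n + 1 - a = 0 by omega]
      simp

-- stage 1 of A in the sorted branch equals a filtered slice
theorem stage1_sorted (entries : List String) (sp : String) (a b : Nat) (hb : b ≤ entries.length) :
    (PySem.List.pyRange (a : Int) (b : Int) 1).foldl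
      (fun matched i =>
        let entry := PySem.List.pyGetD entries i ""
        if PySem.Str.startswith entry sp then matched ++ [entry] else matched) []
    = ((entries.drop a).take (b - a)).filter (fun e => PySem.Str.startswith e sp) := by
  rw [PySem.List.foldl_append_if (fun i => PySem.Str.startswith (PySem.List.pyGetD entries i "") sp)
        (fun i => PySem.List.pyGetD entries i "")]
  rw [show (fun i => PySem.Str.startswith (PySem.List.pyGetD entries i "") sp)
        = ((fun e => PySem.Str.startswith e sp) ∘ (fun i => PySem.List.pyGetD entries i "")) from rfl]
  rw [← List.filter_map, map_pyGetD_range entries "" b a hb]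
  simp

-- filtering after a Python sort equals sorting the filtered list (strings form a linear order)
theorem filter_sorted_comm (p : String → Bool) (l : List String) :
    (PySem.List.sorted l (fun x => x)).filter p = PySem.List.sorted (l.filter p) (fun x => x) :=
  (PySem.List.sorted_id_eq_of_perm_of_pairwise _ _
    ((PySem.List.sorted_perm l (fun x => x) false).filter p)
    ((PySem.List.sorted_pairwise l (fun x => x)).filter p)).symm

-- ===== order facts about code-point lexicographic comparison =====

theorem le_append (s r : List Char) : s ≤ s ++ r := by
  induction s with
  | nil => cases r with
    | nil => exact le_refl _
    | cons c t => exact le_of_lt (List.Lex.nil)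
  | cons c t ih => simpa using List.cons_le_cons c ih

theorem prefix_le_str (sp e : String) (h : sp.toList <+: e.toList) : sp ≤ e := by
  obtain ⟨r, hr⟩ := h
  rw [String.le_iff_toList_le, ← hr]
  exact le_append _ _

theorem lt_of_head (p r : List Char) (x : Char)
    (h : match r with | [] => True | c :: _ => c < x) : p ++ r < p ++ [x] := by
  induction p with
  | nil =>
    cases r with
    | nil => exact List.Lex.nil
    | cons c t => exact List.Lex.rel h
  | cons a q ih => exact List.Lex.cons ih

theorem dom_char_lt (c : Char) (h : pvDomChar c = true) : c < '\uFFFF' := by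
  have h1 : c.toNat < 65535 := by unfold pvDomChar at h; simp at h; omega
  simp only [Char.lt_def]
  exact UInt32.lt_iff_toNat_lt.mpr h1

-- an ASCII-domain string with prefix sp is < sp + '\uffff'
theorem dom_lt_uffff (sp e : String) (h : sp.toList <+: e.toList) (hd : pvDomStr e = true) :
    e < sp ++ "\uFFFF" := by
  obtain ⟨r, hr⟩ := h
  rw [String.lt_iff_toList_lt, show (sp ++ "\uFFFF").toList = sp.toList ++ ['\uFFFF'] by simp, ← hr]
  apply lt_of_head
  cases r with
  | nil => trivial
  | cons c t =>
    apply dom_char_lt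
    have hc : c ∈ e.toList := by rw [← hr]; exact List.mem_append_right _ (List.mem_cons_self)
    exact List.all_eq_true.mp hd c hc

-- ===== bisect_left correctness on a sorted String list =====

theorem bisectLoopStr_spec (xs : List String) (x : String)
    (hs : List.Pairwise (· ≤ ·) xs) :
    ∀ (fuel lo hi : Nat), lo ≤ hi → hi ≤ xs.length → hi - lo ≤ fuel →
      (∀ (j : Nat) (hj : j < xs.length), j < lo → xs[j] < x) →
      (∀ (j : Nat) (hj : j < xs.length), hi ≤ j → x ≤ xs[j]) →
      lo ≤ PySem.List.bisectLeftLoop xs x fuel lo hi ∧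
      PySem.List.bisectLeftLoop xs x fuel lo hi ≤ hi ∧
      (∀ (j : Nat) (hj : j < xs.length), j < PySem.List.bisectLeftLoop xs x fuel lo hi → xs[j] < x) ∧
      (∀ (j : Nat) (hj : j < xs.length), PySem.List.bisectLeftLoop xs x fuel lo hi ≤ j → x ≤ xs[j]) := by
  have hmono := List.pairwise_iff_getElem.mp hs
  intro fuel
  induction fuel with
  | zero =>
    intro lo hi h1 h2 h3 hlo hhi
    rw [PySem.List.bisectLeftLoop]
    exact ⟨le_rfl, h1, hlo, fun j hj hle => hhi j hj (by omega)⟩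
  | succ n ih =>
    intro lo hi h1 h2 h3 hlo hhi
    rw [PySem.List.bisectLeftLoop]
    by_cases hlt : lo < hi
    · simp only [hlt, if_true]
      have hmid : (lo + hi) / 2 < xs.length := by omega
      rw [List.getElem?_eq_getElem hmid]
      by_cases hy : xs[(lo + hi) / 2] < x
      · simp only [hy, if_true]
        have hinv : ∀ (j : Nat) (hj : j < xs.length), j < (lo + hi) / 2 + 1 → xs[j] < x := by
          intro j hj hjlt
          rcases Nat.lt_or_ge j ((lo + hi) / 2) with hc | hc
          · exact lt_of_le_of_lt (hmono j ((lo + hi) / 2) hj hmid hc) hy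
          · have : j = (lo + hi) / 2 := by omega
            subst this; exact hy
        have := ih ((lo + hi) / 2 + 1) hi (by omega) h2 (by omega) hinv hhi
        exact ⟨le_trans (by omega) this.1, this.2.1, this.2.2.1, this.2.2.2⟩
      · simp only [hy, if_false]
        have hxm : x ≤ xs[(lo + hi) / 2] := le_of_not_gt hy
        have hinv : ∀ (j : Nat) (hj : j < xs.length), (lo + hi) / 2 ≤ j → x ≤ xs[j] := by
          intro j hj hge
          rcases Nat.lt_or_ge ((lo + hi) / 2) j with hc | hc
          · exact le_trans hxm (hmono ((lo + hi) / 2) j hmid hj hc)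
          · have : j = (lo + hi) / 2 := by omega
            subst this; exact hxm
        have := ih lo ((lo + hi) / 2) (by omega) (by omega) (by omega) hlo hinv
        exact ⟨this.1, le_trans this.2.1 (by omega), this.2.2.1, this.2.2.2⟩
    · simp only [hlt, if_false]
      exact ⟨le_rfl, h1, hlo, fun j hj hle => hhi j hj (by omega)⟩

theorem bisectLeftStr_spec (xs : List String) (x : String) (hs : List.Pairwise (· ≤ ·) xs) :
    PySem.List.bisectLeft xs x ≤ xs.length ∧
    (∀ (j : Nat) (hj : j < xs.length), j < PySem.List.bisectLeft xs x → xs[j] < x) ∧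
    (∀ (j : Nat) (hj : j < xs.length), PySem.List.bisectLeft xs x ≤ j → x ≤ xs[j]) := by
  have := bisectLoopStr_spec xs x hs xs.length 0 xs.length (Nat.zero_le _) le_rfl (by omega)
    (fun j hj h => by omega) (fun j hj h => by omega)
  exact ⟨this.2.1, this.2.2.1, this.2.2.2⟩

-- on a sorted list every p-match lies in the bisect window [left, right),
-- so filtering the window equals filtering the whole list
theorem filter_slice_eq (entries : List String) (sp : String) (p : String → Bool)
    (hs : List.Pairwise (· ≤ ·) entries)
    (hp_lo : ∀ e, p e = true → sp ≤ e)
    (hp_hi : ∀ e ∈ entries, p e = true → e < sp ++ "\uFFFF") :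
    ((entries.drop (PySem.List.bisectLeft entries sp)).take
        (PySem.List.bisectLeft entries (sp ++ "\uFFFF") - PySem.List.bisectLeft entries sp)).filter p
      = entries.filter p := by
  obtain ⟨hL1, hL2, hL3⟩ := bisectLeftStr_spec entries sp hs
  obtain ⟨hR1, hR2, hR3⟩ := bisectLeftStr_spec entries (sp ++ "\uFFFF") hs
  set L := PySem.List.bisectLeft entries sp with hLdef
  set R := PySem.List.bisectLeft entries (sp ++ "\uFFFF") with hRdef
  have hsple : sp ≤ sp ++ "\uFFFF" :=
    prefix_le_str _ _ ⟨['\uFFFF'], by simp⟩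
  have hLR : L ≤ R := by
    by_contra hcon
    have hcon' : R < L := Nat.lt_of_not_le hcon
    have hRlen : R < entries.length := lt_of_lt_of_le hcon' hL1
    have h1 : entries[R] < sp := hL2 R hRlen hcon'
    have h2 : sp ++ "\uFFFF" ≤ entries[R] := hR3 R hRlen le_rfl
    exact absurd (lt_of_le_of_lt (le_trans hsple h2) h1) (lt_irrefl _)
  have hfilter_take : (entries.take L).filter p = [] := by
    rw [List.filter_eq_nil_iff]
    intro e he hpe
    obtain ⟨i, hi, hie⟩ := List.mem_iff_getElem.mp he
    have hi' : i < L ∧ i < entries.length := by simp [List.length_take] at hi; omega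
    have : entries[i] < sp := hL2 i hi'.2 hi'.1
    rw [List.getElem_take] at hie
    rw [hie] at this
    exact absurd (hp_lo e hpe) (not_le_of_gt this)
  have hfilter_drop : (entries.drop R).filter p = [] := by
    rw [List.filter_eq_nil_iff]
    intro e he hpe
    obtain ⟨i, hi, hie⟩ := List.mem_iff_getElem.mp he
    have hilen : R + i < entries.length := by simp [List.length_drop] at hi; omega
    have hge : sp ++ "\uFFFF" ≤ entries[R + i] := hR3 (R + i) hilen (by omega)
    rw [List.getElem_drop] at hie
    rw [hie] at hge
    exact absurd (hp_hi e (List.mem_of_mem_drop he) hpe) (not_lt_of_ge hge)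
  conv_rhs => rw [← List.take_append_drop L entries]
  rw [List.filter_append, hfilter_take, List.nil_append]
  conv_rhs => rw [← List.take_append_drop (R - L) (entries.drop L)]
  rw [List.filter_append]
  have : (entries.drop L).drop (R - L) = entries.drop R := by
    rw [List.drop_drop]; congr 1; omega
  rw [this, hfilter_drop, List.append_nil]

-- bPred implies the startswith prefix, hence the two order bounds
theorem bPred_prefix (sp e : String) (h : bPred sp.toList e = true) : sp.toList <+: e.toList := by
  rw [pred_eq] at h
  rw [Bool.and_eq_true] at h
  have := h.2
  rw [PySem.Str.startswith_eq] at this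
  exact (PySem.Chars.startswith_iff _ _).mp this

-- ===== VERDICT (by name: the statement is the Claim_ definition above) =====
theorem find_species_prefixed_entries_spec : Claim_equal_find_species_prefixed_entries := by
  intro entries sp b hdom hpre
  unfold Spec_find_species_prefixed_entries
  unfold find_species_prefixed_entries find_species_prefixed_entries_alt find_prefixed_entries
  rw [stage2_eq_filter, bfold_eq_filter]
  have hdall : ∀ e ∈ entries, pvDomStr e = true := by
    unfold Dom_find_species_prefixed_entries at hdom
    simp only [Bool.and_eq_true, List.all_eq_true] at hdom
    exact hdom.1
  cases b with
  | false =>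
    simp only [Bool.false_eq_true, if_false]
    rw [filter_sorted_comm, List.filter_filter]
    congr 1
    exact List.filter_congr (fun e _ => (pred_eq sp e).symm)
  | true =>
    simp only [if_true]
    have hsorted : List.Pairwise (· ≤ ·) entries := hpre rfl
    rw [stage1_sorted entries sp _ _ (bisectLeft_le_len entries (sp ++ "\uFFFF"))]
    rw [List.filter_filter]
    rw [← filter_slice_eq entries sp (bPred sp.toList) hsorted
          (fun e hpe => prefix_le_str sp e (bPred_prefix sp e hpe))
          (fun e he hpe => dom_lt_uffff sp e (bPred_prefix sp e hpe) (hdall e he))]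
    exact List.filter_congr (fun e _ => (pred_eq sp e).symm)
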